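-- pv_equiv track=rewrite | github.com/zebraxlj/AwsTools | utils/aws_urls.py | mask_url_part
-- ===== SOURCE A (Python) =====
-- def mask_url_part(part: str) -> str:
--     """ 转换为 HTML 码 """
--     mappings = {
--         '$252F': '/',
--         '$252C': ',',
--         '$255B': '[',
--         '$255D': ']',
--         # '$253D': '=',
--         '$2521': '!',
--         '$2522': '"',
--         # '$252F': '_',
--         '$257C': '|',
--         '$2B': '+',
--         '$26': '&',
--         '$3D': '=',
--         '$3F': '?'
--     }
--     for k, v in mappings.items():
--         part = part.replace(v, k)
--     return part
-- ===== SOURCE B (Python) =====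
-- def mask_url_part(part: str) -> str:
--     """ 转换为 HTML 码 """
--     out = []
--     for c in part:
--         out.append(_encode_char(c))
--     return ''.join(out)
--
--
-- def _encode_char(c: str) -> str:
--     if c == '/':
--         return '$252F'
--     elif c == ',':
--         return '$252C'
--     elif c == '[':
--         return '$255B'
--     elif c == ']':
--         return '$255D'
--     elif c == '!':
--         return '$2521'
--     elif c == '"':
--         return '$2522'
--     elif c == '|':
--         return '$257C'
--     elif c == '+':
--         return '$2B'
--     elif c == '&':
--         return '$26'
--     elif c == '=':
--         return '$3D'
--     elif c == '?':
--         return '$3F'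
--     else:
--         return c
-- ===== Notes on version B (the rewrite author's own statement) =====
-- stated objective: alternative
-- what changed: Instead of eleven sequential full-string .replace passes driven by a mappings dict, B makes one pass over the input characters, encoding each with a per-character branch chain and joining the pieces.
import Mathlib
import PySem

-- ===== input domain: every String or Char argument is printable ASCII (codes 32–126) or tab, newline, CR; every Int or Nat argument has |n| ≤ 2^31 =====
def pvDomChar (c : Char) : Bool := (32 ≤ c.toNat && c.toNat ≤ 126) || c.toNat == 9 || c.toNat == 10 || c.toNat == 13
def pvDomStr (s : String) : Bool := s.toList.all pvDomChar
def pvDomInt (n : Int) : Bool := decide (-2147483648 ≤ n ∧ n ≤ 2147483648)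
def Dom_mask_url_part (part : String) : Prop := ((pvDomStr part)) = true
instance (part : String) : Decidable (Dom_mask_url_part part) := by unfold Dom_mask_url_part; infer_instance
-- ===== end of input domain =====

-- B replaces A's eleven sequential full-string replace passes with one pass over the
-- characters, a per-character branch chain, and a final join (objective: alternative).

-- ===== PORT A =====
def pvMappings : PySem.Dict String String :=
  PySem.Dict.ofList [("$252F", "/"), ("$252C", ","), ("$255B", "["), ("$255D", "]"),
    ("$2521", "!"), ("$2522", "\""), ("$257C", "|"), ("$2B", "+"), ("$26", "&"),
    ("$3D", "="), ("$3F", "?")]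

def mask_url_part (part : String) : String :=
  (PySem.Dict.items pvMappings).foldl (fun p kv => PySem.Str.replace p kv.2 kv.1) part

-- ===== PORT B =====
def pvEncodeChar (c : Char) : String :=
  if c = '/' then "$252F"
  else if c = ',' then "$252C"
  else if c = '[' then "$255B"
  else if c = ']' then "$255D"
  else if c = '!' then "$2521"
  else if c = '"' then "$2522"
  else if c = '|' then "$257C"
  else if c = '+' then "$2B"
  else if c = '&' then "$26"
  else if c = '=' then "$3D"
  else if c = '?' then "$3F"
  else String.ofList [c]

def mask_url_part_alt (part : String) : String :=
  PySem.Str.join "" (part.toList.foldl (fun out c => out ++ [pvEncodeChar c]) [])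

-- ===== PRECONDITION & SPEC =====
def Spec_mask_url_part (part : String) (out : String) : Prop := out = mask_url_part_alt part
instance (part : String) (out : String) : Decidable (Spec_mask_url_part part out) := by unfold Spec_mask_url_part; infer_instance

-- ===== CLAIM (what is proved, stated in full; the proofs are below) =====
def Claim_equal_mask_url_part : Prop := ∀ (part : String), Dom_mask_url_part part → Spec_mask_url_part part (mask_url_part part)

-- ===== LEMMAS AND PROOFS =====

theorem go_single (v : Char) (new : List Char) :
  ∀ (fuel : Nat) (l acc : List Char), l.length ≤ fuel →
    PySem.Chars.replace.go [v] new fuel l acc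
      = acc.reverse ++ l.flatMap (fun c => if c = v then new else [c]) := by
  intro fuel
  induction fuel with
  | zero =>
    intro l acc h
    have hl : l = [] := by cases l <;> simp_all
    subst hl
    simp [PySem.Chars.replace.go]
  | succ n ih =>
    intro l acc h
    cases l with
    | nil => simp [PySem.Chars.replace.go]
    | cons c t =>
      rw [PySem.Chars.replace.go]
      by_cases hc : c = v
      · subst hc
        have hpre : List.isPrefixOf [c] (c :: t) = true := by simp [List.isPrefixOf]
        simp only [hpre, if_pos]
        rw [ih _ _ (by simpa using Nat.le_of_succ_le_succ (by simpa using h))]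
        simp
      · have hpre : List.isPrefixOf [v] (c :: t) = false := by
          simp [List.isPrefixOf]
          intro hh; exact absurd hh.symm hc
        simp only [hpre]
        rw [ih t (c :: acc) (by simpa using Nat.le_of_succ_le_succ (by simpa using h))]
        simp [hc]

theorem replace_single (v : Char) (new s : List Char) :
    PySem.Chars.replace s [v] new = s.flatMap (fun c => if c = v then new else [c]) := by
  rw [PySem.Chars.replace]
  have h : ([v].isEmpty) = false := rfl
  rw [h]
  simp only [Bool.false_eq_true, if_false]
  exact (go_single v new s.length s [] (le_refl _)).trans (by simp)

theorem join_nil_flatten (l : List (List Char)) :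
    PySem.Chars.join [] l = l.flatten := by
  rw [PySem.Chars.join]
  induction l with
  | nil => simp [List.intercalate]
  | cons a t ih =>
    cases t with
    | nil => simp [List.intercalate]
    | cons b t' =>
      simp only [List.intercalate] at ih ⊢
      simp [List.intersperse] at ih ⊢
      exact ih

theorem foldl_append_map {α β : Type} (f : α → β) :
    ∀ (l : List α) (acc : List β),
      l.foldl (fun out c => out ++ [f c]) acc = acc ++ l.map f := by
  intro l
  induction l with
  | nil => simp
  | cons a t ih => intro acc; simp [List.foldl, ih]

theorem mask_url_part_spec : Claim_equal_mask_url_part := by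
  intro part _
  unfold Spec_mask_url_part
  apply String.toList_inj.mp
  -- left side: unfold the foldl over the eleven concrete items into nested replaces
  have hitems : (PySem.Dict.items pvMappings)
      = [("$252F", "/"), ("$252C", ","), ("$255B", "["), ("$255D", "]"),
         ("$2521", "!"), ("$2522", "\""), ("$257C", "|"), ("$2B", "+"), ("$26", "&"),
         ("$3D", "="), ("$3F", "?")] := by decide
  rw [mask_url_part, hitems]
  simp only [List.foldl]
  simp only [PySem.Str.toList_replace]
  simp only [show ("/" : String).toList = ['/'] from rfl,
    show ("," : String).toList = [','] from rfl,
    show ("[" : String).toList = ['['] from rfl,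
    show ("]" : String).toList = [']'] from rfl,
    show ("!" : String).toList = ['!'] from rfl,
    show ("\"" : String).toList = ['"'] from rfl,
    show ("|" : String).toList = ['|'] from rfl,
    show ("+" : String).toList = ['+'] from rfl,
    show ("&" : String).toList = ['&'] from rfl,
    show ("=" : String).toList = ['='] from rfl,
    show ("?" : String).toList = ['?'] from rfl]
  simp only [replace_single, List.flatMap_assoc]
  -- right side: the accumulator loop is a map, the join of "" a flatten
  rw [mask_url_part_alt, PySem.Str.toList_join]
  rw [foldl_append_map]
  simp only [show ("" : String).toList = ([] : List Char) from rfl, List.nil_append]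
  rw [List.map_map, join_nil_flatten, ← List.flatMap_def]
  -- pointwise equality of the two per-character encoders
  apply List.flatMap_congr
  intro c _
  by_cases h1 : c = '/'; · subst h1; decide
  by_cases h2 : c = ','; · subst h2; decide
  by_cases h3 : c = '['; · subst h3; decide
  by_cases h4 : c = ']'; · subst h4; decide
  by_cases h5 : c = '!'; · subst h5; decide
  by_cases h6 : c = '"'; · subst h6; decide
  by_cases h7 : c = '+'; · subst h7; decide
  by_cases h8 : c = '|'; · subst h8; decide
  by_cases h9 : c = '&'; · subst h9; decide
  by_cases h10 : c = '='; · subst h10; decide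
  by_cases h11 : c = '?'; · subst h11; decide
  simp [h1, h2, h3, h4, h5, h6, h7, h8, h9, h10, h11, pvEncodeChar, String.toList_ofList]
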